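-- pv_equiv track=rewrite | github.com/ikornaselur/advent-of-code | src/advent_of_code/year_2015/day_5/__init__.py | _has_non_overlapping_pair
-- ===== SOURCE A (Python) =====
-- def _has_non_overlapping_pair(string: str) -> bool:
--     if len(string) < 4:
--         return False
--     pairs = {string[0:2]}
--     last_pair = string[1:3]
--
--     # idx is upper limit
--     idx = 4
--     while idx <= len(string):
--         next_pair = string[idx - 2 : idx]
--         if next_pair in pairs:
--             return True
--
--         pairs.add(last_pair)
--         last_pair = next_pair
--         idx += 1
--
--     return False
-- ===== SOURCE B (Python) =====
-- def _has_non_overlapping_pair(string: str) -> bool: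
--     return any(string[i:i + 2] in string[i + 2:] for i in range(len(string) - 1))
-- ===== Notes on version B (the rewrite author's own statement) =====
-- stated objective: idiomatic
-- what changed: Replaces the single-pass set-with-delayed-insertion while-loop by a one-line nested scan: for each index i, test whether the pair string[i:i+2] occurs as a substring of the suffix string[i+2:] (which enforces non-overlap), with no length-4 guard.
import Mathlib
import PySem

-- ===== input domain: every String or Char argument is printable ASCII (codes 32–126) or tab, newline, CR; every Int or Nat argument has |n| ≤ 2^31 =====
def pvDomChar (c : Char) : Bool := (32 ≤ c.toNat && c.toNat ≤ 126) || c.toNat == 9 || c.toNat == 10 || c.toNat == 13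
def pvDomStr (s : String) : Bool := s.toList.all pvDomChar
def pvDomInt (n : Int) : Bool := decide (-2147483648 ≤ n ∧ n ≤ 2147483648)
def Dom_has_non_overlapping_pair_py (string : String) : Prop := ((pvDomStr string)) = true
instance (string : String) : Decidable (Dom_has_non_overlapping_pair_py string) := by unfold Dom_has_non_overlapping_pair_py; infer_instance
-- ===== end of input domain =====

-- B replaces A's single-pass set-with-delayed-insertion loop by an idiomatic nested
-- substring scan (pair at i searched in the suffix from i+2); same results, no length guard.

-- ===== PORT A =====
-- the 'while idx <= len(string)' loop; fuel = number of remaining iterations (len+1-idx)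
def pvA_loop (l : List Char) (pairs : PySem.Set (List Char)) (last_pair : List Char)
    (idx : Nat) : Nat → Bool
  | 0 => false
  | fuel + 1 =>
    let next_pair := PySem.List.slice l (some ((idx : Int) - 2)) (some (idx : Int))
    if PySem.Set.contains pairs next_pair then true
    else pvA_loop l (PySem.Set.add pairs last_pair) next_pair (idx + 1) fuel

def has_non_overlapping_pair_py (string : String) : Bool :=
  let l := string.toList
  if l.length < 4 then false
  else
    let pairs := PySem.Set.add PySem.Set.empty (PySem.List.slice l (some 0) (some 2))
    let last_pair := PySem.List.slice l (some 1) (some 3)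
    pvA_loop l pairs last_pair 4 (l.length + 1 - 4)

-- ===== PORT B =====
def has_non_overlapping_pair_py_alt (string : String) : Bool :=
  let l := string.toList
  (PySem.List.pyRange 0 ((l.length : Int) - 1) 1).any (fun i =>
    PySem.Chars.isIn (PySem.List.slice l (some i) (some (i + 2)))
      (PySem.List.slice l (some (i + 2)) none))

-- ===== PRECONDITION & SPEC =====
def Spec_has_non_overlapping_pair_py (string : String) (out : Bool) : Prop := out = has_non_overlapping_pair_py_alt string
instance (string : String) (out : Bool) : Decidable (Spec_has_non_overlapping_pair_py string out) := by unfold Spec_has_non_overlapping_pair_py; infer_instance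

-- ===== CLAIM (what is proved, stated in full; the proofs are below) =====
def Claim_equal_has_non_overlapping_pair_py : Prop := ∀ (string : String), Dom_has_non_overlapping_pair_py string → Spec_has_non_overlapping_pair_py string (has_non_overlapping_pair_py string)

-- ===== LEMMAS AND PROOFS =====

-- the pair of characters starting at position i
def pvPairAt (l : List Char) (i : Nat) : List Char := (l.drop i).take 2

-- the common specification: some pair repeats at distance ≥ 2
def pvQ (l : List Char) : Prop :=
  ∃ i j : Nat, i + 2 ≤ j ∧ j + 2 ≤ l.length ∧ pvPairAt l i = pvPairAt l j

lemma pvSlice_pair (l : List Char) (n : Nat) :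
    PySem.List.slice l (some (n : Int)) (some ((n : Int) + 2)) = pvPairAt l n := by
  have h : ((n : Int) + 2) = ((n + 2 : Nat) : Int) := by push_cast; ring
  rw [h, PySem.List.slice_natCast]
  simp [pvPairAt]

lemma pvSlice_suffix (l : List Char) (n : Nat) :
    PySem.List.slice l (some ((n : Int) + 2)) none = l.drop (n + 2) := by
  have h : ((n : Int) + 2) = ((n + 2 : Nat) : Int) := by push_cast; ring
  rw [h, PySem.List.slice_from_natCast]

lemma pvPairAt_len (l : List Char) (i : Nat) (h : i + 2 ≤ l.length) :
    (pvPairAt l i).length = 2 := by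
  simp [pvPairAt]; omega

lemma pvPrefix_iff (l : List Char) (i m : Nat) (hi : i + 2 ≤ l.length) :
    pvPairAt l i <+: l.drop m ↔ (m + 2 ≤ l.length ∧ pvPairAt l m = pvPairAt l i) := by
  constructor
  · intro h
    have h2 := List.prefix_iff_eq_take.mp h
    rw [pvPairAt_len l i hi] at h2
    have hlen : (pvPairAt l i).length ≤ (l.drop m).length := List.IsPrefix.length_le h
    rw [pvPairAt_len l i hi, List.length_drop] at hlen
    exact ⟨by omega, h2.symm⟩
  · rintro ⟨hm, he⟩
    rw [← he]
    exact List.take_prefix 2 (l.drop m)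

lemma pvB_iff (s : String) :
    has_non_overlapping_pair_py_alt s = true ↔ pvQ s.toList := by
  unfold has_non_overlapping_pair_py_alt
  set l := s.toList with hl
  rw [List.any_eq_true]
  constructor
  · rintro ⟨i, hmem, hp⟩
    rw [PySem.List.mem_pyRange_one] at hmem
    obtain ⟨hi0, hilt⟩ := hmem
    set n := i.toNat with hn
    have hni : i = (n : Int) := by omega
    have hn2 : n + 2 ≤ l.length := by omega
    rw [hni, pvSlice_pair l n, pvSlice_suffix l n,
      ← PySem.Chars.exists_prefix_drop_iff_isIn] at hp
    obtain ⟨k, hk⟩ := hp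
    rw [List.drop_drop] at hk
    have := (pvPrefix_iff l n (n + 2 + k) hn2).mp hk
    exact ⟨n, n + 2 + k, by omega, this.1, this.2.symm⟩
  · rintro ⟨i, j, hij, hjl, he⟩
    refine ⟨(i : Int), ?_, ?_⟩
    · rw [PySem.List.mem_pyRange_one]
      exact ⟨Int.natCast_nonneg i, by omega⟩
    · have hi2 : i + 2 ≤ l.length := by omega
      rw [pvSlice_pair l i, pvSlice_suffix l i, ← PySem.Chars.exists_prefix_drop_iff_isIn]
      refine ⟨j - (i + 2), ?_⟩
      rw [List.drop_drop]
      have hj : i + 2 + (j - (i + 2)) = j := by omega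
      rw [hj]
      exact (pvPrefix_iff l i j hi2).mpr ⟨hjl, he.symm⟩

lemma pvA_loop_iff (l : List Char) (fuel : Nat) :
    ∀ (pairs : PySem.Set (List Char)) (last : List Char) (idx : Nat),
    4 ≤ idx → fuel + idx = l.length + 1 →
    (∀ p, p ∈ pairs ↔ ∃ i, i + 4 ≤ idx ∧ pvPairAt l i = p) →
    last = pvPairAt l (idx - 3) →
    (pvA_loop l pairs last idx fuel = true ↔
      ∃ j, idx ≤ j + 2 ∧ j + 2 ≤ l.length ∧ ∃ i, i + 2 ≤ j ∧ pvPairAt l i = pvPairAt l j) := by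
  induction fuel with
  | zero =>
    intro pairs last idx h4 hf hp hl
    simp only [pvA_loop]
    constructor
    · intro h; exact absurd h (by simp)
    · rintro ⟨j, hj1, hj2, -⟩; omega
  | succ fuel ih =>
    intro pairs last idx h4 hf hp hl
    have hidx : idx ≤ l.length := by omega
    have hcast1 : (idx : Int) - 2 = ((idx - 2 : Nat) : Int) := by omega
    have hcast2 : (idx : Int) = ((idx - 2 : Nat) : Int) + 2 := by omega
    have hnext : PySem.List.slice l (some ((idx : Int) - 2)) (some (idx : Int))
        = pvPairAt l (idx - 2) := by
      rw [hcast1, hcast2, pvSlice_pair l (idx - 2)]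
    simp only [pvA_loop, hnext]
    by_cases hc : PySem.Set.contains pairs (pvPairAt l (idx - 2)) = true
    · rw [if_pos hc]
      obtain ⟨i, hi4, hieq⟩ := (hp _).mp ((PySem.Set.contains_iff _ _).mp hc)
      constructor
      · intro _
        exact ⟨idx - 2, by omega, by omega, i, by omega, hieq⟩
      · intro _; rfl
    · rw [if_neg hc]
      have hcf : ∀ i, i + 4 ≤ idx → pvPairAt l i ≠ pvPairAt l (idx - 2) := by
        intro i hi he
        exact hc ((PySem.Set.contains_iff _ _).mpr ((hp _).mpr ⟨i, hi, he⟩))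
      rw [ih (PySem.Set.add pairs last) (pvPairAt l (idx - 2)) (idx + 1) (by omega) (by omega)
        (by
          intro p
          rw [PySem.Set.mem_add, hp, hl]
          constructor
          · rintro (⟨i, hi, he⟩ | he)
            · exact ⟨i, by omega, he⟩
            · exact ⟨idx - 3, by omega, he.symm⟩
          · rintro ⟨i, hi, he⟩
            by_cases h : i + 4 ≤ idx
            · exact Or.inl ⟨i, h, he⟩
            · have : i = idx - 3 := by omega
              subst this; exact Or.inr he.symm)
        (by rw [show idx + 1 - 3 = idx - 2 from by omega])]
      constructor
      · rintro ⟨j, hj1, hj2, hi⟩; exact ⟨j, by omega, hj2, hi⟩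
      · rintro ⟨j, hj1, hj2, i, hi2, he⟩
        refine ⟨j, ?_, hj2, i, hi2, he⟩
        by_contra h
        have hj : j = idx - 2 := by omega
        subst hj
        exact hcf i (by omega) he

lemma pvQ_len (l : List Char) (h : pvQ l) : 4 ≤ l.length := by
  obtain ⟨i, j, h1, h2, -⟩ := h; omega

-- ===== VERDICT (by name: the statement is the Claim_ definition above) =====
theorem has_non_overlapping_pair_py_spec : Claim_equal_has_non_overlapping_pair_py := by
  intro s _
  unfold Spec_has_non_overlapping_pair_py has_non_overlapping_pair_py
  set l := s.toList with hl
  by_cases hlen : l.length < 4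
  · rw [if_pos hlen]
    cases hB : has_non_overlapping_pair_py_alt s with
    | false => rfl
    | true => exact absurd (pvQ_len l ((pvB_iff s).mp hB)) (by omega)
  · rw [if_neg hlen]
    have hlen4 : 4 ≤ l.length := by omega
    have hinit : PySem.List.slice l (some 0) (some 2) = pvPairAt l 0 := by
      have := pvSlice_pair l 0
      norm_num at this
      exact this
    have hinit2 : PySem.List.slice l (some 1) (some 3) = pvPairAt l 1 := by
      have := pvSlice_pair l 1
      norm_num at this
      exact this
    rw [hinit, hinit2]
    have hloop := pvA_loop_iff l (l.length + 1 - 4)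
      (PySem.Set.add PySem.Set.empty (pvPairAt l 0)) (pvPairAt l 1) 4 (le_refl 4) (by omega)
      (by
        intro p
        rw [PySem.Set.mem_add]
        constructor
        · rintro (h | h)
          · exact absurd h (by simp [PySem.Set.empty])
          · exact ⟨0, by omega, h.symm⟩
        · rintro ⟨i, hi, he⟩
          have : i = 0 := by omega
          subst this; exact Or.inr he.symm)
      rfl
    rw [Bool.eq_iff_iff, hloop, pvB_iff s]
    constructor
    · rintro ⟨j, -, hj2, i, hi2, he⟩; exact ⟨i, j, hi2, hj2, he⟩
    · rintro ⟨i, j, hi2, hj2, he⟩; exact ⟨j, by omega, hj2, i, hi2, he⟩
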